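-- pv_equiv track=rewrite | github.com/davidelaverga/Sophia-Agent | backend/app/gateway/routers/sophia.py | _dedupe_memories_by_id
-- ===== SOURCE A (Python) =====
-- def _memory_timestamp(memory: dict) -> str:
--     updated_at = memory.get("updated_at") if isinstance(memory, dict) else None
--     if isinstance(updated_at, str) and updated_at:
--         return updated_at
--
--     created_at = memory.get("created_at") if isinstance(memory, dict) else None
--     if isinstance(created_at, str) and created_at:
--         return created_at
--
--     return ""
--
-- def _dedupe_memories_by_id(memories: list[dict]) -> list[dict]:
--     deduped: list[dict] = []
--     index_by_id: dict[str, int] = {}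
--
--     for memory in memories:
--         if not isinstance(memory, dict):
--             deduped.append(memory)
--             continue
--
--         memory_id = memory.get("id")
--         if not isinstance(memory_id, str) or not memory_id:
--             deduped.append(memory)
--             continue
--
--         existing_index = index_by_id.get(memory_id)
--         if existing_index is None:
--             index_by_id[memory_id] = len(deduped)
--             deduped.append(memory)
--             continue
--
--         if _memory_timestamp(memory) >= _memory_timestamp(deduped[existing_index]):
--             deduped[existing_index] = memory
--
--     return deduped
-- ===== SOURCE B (Python) =====
-- def _memory_timestamp(memory: dict) -> str:
--     updated_at = memory.get("updated_at") if isinstance(memory, dict) else None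
--     if isinstance(updated_at, str) and updated_at:
--         return updated_at
--
--     created_at = memory.get("created_at") if isinstance(memory, dict) else None
--     if isinstance(created_at, str) and created_at:
--         return created_at
--
--     return ""
--
--
-- def _dedupe_memories_by_id(memories: list) -> list:
--     # Pass 1: table of the best (latest-timestamp, ties -> later occurrence) memory per id.
--     best_by_id: dict = {}
--     for memory in memories:
--         if not isinstance(memory, dict):
--             continue
--         memory_id = memory.get("id")
--         if not isinstance(memory_id, str) or not memory_id:
--             continue
--         current = best_by_id.get(memory_id)
--         if current is None or _memory_timestamp(memory) >= _memory_timestamp(current):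
--             best_by_id[memory_id] = memory
--
--     # Pass 2: rebuild the list, emitting the best memory at the first occurrence of each id.
--     result: list = []
--     seen: set = set()
--     for memory in memories:
--         if not isinstance(memory, dict):
--             result.append(memory)
--             continue
--         memory_id = memory.get("id")
--         if not isinstance(memory_id, str) or not memory_id:
--             result.append(memory)
--             continue
--         if memory_id in seen:
--             continue
--         seen.add(memory_id)
--         result.append(best_by_id[memory_id])
--     return result
-- ===== Notes on version B (the rewrite author's own statement) =====
-- stated objective: simpler
-- what changed: Replaces A's single pass that mutates the output in place through an id->index table with a two-pass decomposition: first build a best-memory-per-id table (>= so a later occurrence wins ties), then rebuild the output appending the best entry at each id's first occurrence, never indexing into or mutating the output list.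
import Mathlib
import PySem

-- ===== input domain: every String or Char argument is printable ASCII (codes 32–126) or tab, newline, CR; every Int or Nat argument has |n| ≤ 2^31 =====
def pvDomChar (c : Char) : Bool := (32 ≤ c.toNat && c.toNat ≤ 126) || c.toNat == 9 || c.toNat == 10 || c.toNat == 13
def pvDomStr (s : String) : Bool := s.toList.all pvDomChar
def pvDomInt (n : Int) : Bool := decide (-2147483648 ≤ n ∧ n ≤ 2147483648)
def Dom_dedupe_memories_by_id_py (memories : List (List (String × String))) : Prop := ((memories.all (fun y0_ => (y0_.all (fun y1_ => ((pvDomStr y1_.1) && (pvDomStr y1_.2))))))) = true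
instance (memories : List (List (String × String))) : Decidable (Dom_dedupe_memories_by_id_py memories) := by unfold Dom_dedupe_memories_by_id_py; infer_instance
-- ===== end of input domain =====

-- B replaces A's single pass that mutates the output in place through an id->index table with a
-- two-pass decomposition (best-per-id table, then rebuild), same values and order; objective: simpler.

-- shared helper: port of Python's `s1 >= s2` on strings (code-point lexicographic), as a Bool
def pyStrGe (a b : List Char) : Bool :=
  match a, b with
  | _, [] => true
  | [], _ :: _ => false
  | x :: xs, y :: ys => (y.toNat < x.toNat) || (x == y && pyStrGe xs ys)

-- shared helper: port of the module helper `_memory_timestamp` (both A and B call it)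
def memTs (m : List (String × String)) : String :=
  match PySem.Dict.get? ⟨m⟩ "updated_at" with
  | some u =>
    if u ≠ "" then u
    else
      match PySem.Dict.get? ⟨m⟩ "created_at" with
      | some c => if c ≠ "" then c else ""
      | none => ""
  | none =>
    match PySem.Dict.get? ⟨m⟩ "created_at" with
    | some c => if c ≠ "" then c else ""
    | none => ""

-- ===== PORT A =====
-- loop body of A (isinstance checks are always true for List (String × String) inputs)
def stepA (st : List (List (String × String)) × PySem.Dict String Nat)
    (m : List (String × String)) : List (List (String × String)) × PySem.Dict String Nat :=
  match PySem.Dict.get? ⟨m⟩ "id" with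
  | none => (st.1 ++ [m], st.2)
  | some mid =>
    if mid = "" then (st.1 ++ [m], st.2)
    else
      match PySem.Dict.get? st.2 mid with
      | none => (st.1 ++ [m], st.2.insert mid st.1.length)
      | some j =>
        -- `deduped[existing_index]` is always in range; getD is exact here
        if pyStrGe (memTs m).toList (memTs (st.1.getD j [])).toList then (st.1.set j m, st.2)
        else (st.1, st.2)

def dedupe_memories_by_id_py (memories : List (List (String × String))) : List (List (String × String)) :=
  (memories.foldl stepA ([], PySem.Dict.empty)).1

-- ===== PORT B =====
-- pass 1 loop body: best-memory-per-id table
def bestStep (best : PySem.Dict String (List (String × String)))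
    (m : List (String × String)) : PySem.Dict String (List (String × String)) :=
  match PySem.Dict.get? ⟨m⟩ "id" with
  | none => best
  | some mid =>
    if mid = "" then best
    else
      match PySem.Dict.get? best mid with
      | none => best.insert mid m
      | some cur => if pyStrGe (memTs m).toList (memTs cur).toList then best.insert mid m else best

-- pass 2 loop body: rebuild, emitting best entry at each id's first occurrence
-- (`best_by_id[memory_id]` never raises here, so getD with the element itself as default is exact)
def rebuildStep (best : PySem.Dict String (List (String × String)))
    (st : List (List (String × String)) × PySem.Set String)
    (m : List (String × String)) : List (List (String × String)) × PySem.Set String :=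
  match PySem.Dict.get? ⟨m⟩ "id" with
  | none => (st.1 ++ [m], st.2)
  | some mid =>
    if mid = "" then (st.1 ++ [m], st.2)
    else if PySem.Set.contains st.2 mid then st
    else (st.1 ++ [best.getD mid m], PySem.Set.add st.2 mid)

def dedupe_memories_by_id_py_alt (memories : List (List (String × String))) : List (List (String × String)) :=
  let best := memories.foldl bestStep PySem.Dict.empty
  (memories.foldl (rebuildStep best) ([], PySem.Set.empty)).1

-- ===== PRECONDITION & SPEC =====
def Spec_dedupe_memories_by_id_py (memories : List (List (String × String))) (out : List (List (String × String))) : Prop := out = dedupe_memories_by_id_py_alt memories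
instance (memories : List (List (String × String))) (out : List (List (String × String))) : Decidable (Spec_dedupe_memories_by_id_py memories out) := by unfold Spec_dedupe_memories_by_id_py; infer_instance

-- ===== CLAIM (what is proved, stated in full; the proofs are below) =====
def Claim_equal_dedupe_memories_by_id_py : Prop := ∀ (memories : List (List (String × String))), Dom_dedupe_memories_by_id_py memories → Spec_dedupe_memories_by_id_py memories (dedupe_memories_by_id_py memories)

-- ===== LEMMAS AND PROOFS =====

-- the (non-empty) id of a memory, if any
def idOf (m : List (String × String)) : Option String :=
  match PySem.Dict.get? ⟨m⟩ "id" with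
  | none => none
  | some s => if s = "" then none else some s

def validIds (l : List (List (String × String))) : List String := l.filterMap idOf

def Afold (l : List (List (String × String))) : List (List (String × String)) × PySem.Dict String Nat :=
  l.foldl stepA ([], PySem.Dict.empty)

def bestD (l : List (List (String × String))) : PySem.Dict String (List (String × String)) :=
  l.foldl bestStep PySem.Dict.empty

def F (T : PySem.Dict String (List (String × String))) (l : List (List (String × String))) :
    List (List (String × String)) × PySem.Set String :=
  l.foldl (rebuildStep T) ([], PySem.Set.empty)

theorem Afold_append (l : List (List (String × String))) (m : List (String × String)) :
    Afold (l ++ [m]) = stepA (Afold l) m := by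
  simp [Afold]

theorem bestD_append (l : List (List (String × String))) (m : List (String × String)) :
    bestD (l ++ [m]) = bestStep (bestD l) m := by
  simp [bestD]

theorem F_append (T : PySem.Dict String (List (String × String))) (l : List (List (String × String))) (m : List (String × String)) :
    F T (l ++ [m]) = rebuildStep T (F T l) m := by
  simp [F]

theorem validIds_append (l : List (List (String × String))) (m : List (String × String)) :
    validIds (l ++ [m]) = validIds l ++ (idOf m).toList := by
  cases h : idOf m <;> simp [validIds, h]

-- the seen-set of pass 2 is exactly the set of valid ids, independently of the table
theorem snd_F (T : PySem.Dict String (List (String × String))) (l : List (List (String × String))) :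
    (F T l).2 = PySem.Set.ofList (validIds l) := by
  induction l using List.reverseRecOn with
  | nil => rfl
  | append_singleton l m ih =>
    rw [F_append, validIds_append]
    cases h : idOf m with
    | none =>
      simp only [idOf] at h
      rcases hg : PySem.Dict.get? (⟨m⟩ : PySem.Dict String String) "id" with _ | s
      · simp [rebuildStep, hg, ih]
      · rw [hg] at h
        have hs : s = "" := by by_cases hs : s = "" <;> simp [hs] at h ⊢
        simp [rebuildStep, hg, hs, ih]
    | some mid =>
      simp only [idOf] at h
      rcases hg : PySem.Dict.get? (⟨m⟩ : PySem.Dict String String) "id" with _ | s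
      · rw [hg] at h; simp at h
      · have hs : s ≠ "" := by intro hs; rw [hg] at h; simp [hs] at h
        rw [hg] at h; simp [hs] at h; subst h
        show _ = PySem.Set.ofList (validIds l ++ [s])
        rw [PySem.Set.ofList_append_singleton]
        by_cases hm : s ∈ validIds l
        · simp [rebuildStep, hg, hs, ih, hm]
        · simp [rebuildStep, hg, hs, ih, hm, PySem.Set.add]

-- which ids the best table contains
theorem bestD_get?_none (l : List (List (String × String))) (i : String) :
    (bestD l).get? i = none ↔ i ∉ validIds l := by
  induction l using List.reverseRecOn with
  | nil => simp [bestD, validIds, PySem.Dict.get?_empty]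
  | append_singleton l m ih =>
    rw [bestD_append, validIds_append]
    rcases hg : PySem.Dict.get? (⟨m⟩ : PySem.Dict String String) "id" with _ | s
    · simp [bestStep, hg, idOf, ih]
    · by_cases hs : s = ""
      · simp [bestStep, hg, hs, idOf, ih]
      · rcases hb : PySem.Dict.get? (bestD l) s with _ | cur
        · by_cases hi : i = s <;>
            simp [bestStep, hg, hs, idOf, PySem.Dict.get?_insert, hi, ih, hb]
        · by_cases hi : i = s
          · subst hi
            have him : i ∈ validIds l := by
              by_contra hni
              rw [ih.mpr hni] at hb; cases hb
            simp only [bestStep, hg, if_neg hs, hb]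
            split <;> simp [hb, idOf, hs, him, hg]
          · simp only [bestStep, hg, if_neg hs, hb]
            split <;> simp [PySem.Dict.get?_insert, hi, ih, idOf, hs, hg]

-- the output length of pass 2 does not depend on the table
theorem F_length (T T' : PySem.Dict String (List (String × String))) (l : List (List (String × String))) :
    (F T l).1.length = (F T' l).1.length := by
  induction l using List.reverseRecOn with
  | nil => rfl
  | append_singleton l m ih =>
    rw [F_append, F_append]
    rcases hg : PySem.Dict.get? (⟨m⟩ : PySem.Dict String String) "id" with _ | s
    · simp [rebuildStep, hg, ih]
    · by_cases hs : s = ""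
      · simp [rebuildStep, hg, hs, ih]
      · simp only [rebuildStep, hg, if_neg hs, snd_F]
        by_cases hm : s ∈ validIds l <;> simp [hm, ih]

-- pass 2 only reads the table at valid ids
theorem F_congr (T T' : PySem.Dict String (List (String × String))) (l : List (List (String × String)))
    (h : ∀ i ∈ validIds l, T.get? i = T'.get? i) : (F T l).1 = (F T' l).1 := by
  induction l using List.reverseRecOn with
  | nil => rfl
  | append_singleton l m ih =>
    have h' : ∀ i ∈ validIds l, T.get? i = T'.get? i := by
      intro i hi
      exact h i (by rw [validIds_append]; exact List.mem_append_left _ hi)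
    rw [F_append, F_append]
    rcases hg : PySem.Dict.get? (⟨m⟩ : PySem.Dict String String) "id" with _ | s
    · simp [rebuildStep, hg, ih h']
    · by_cases hs : s = ""
      · simp [rebuildStep, hg, hs, ih h']
      · have hmem : s ∈ validIds (l ++ [m]) := by
          rw [validIds_append]
          simp [idOf, hg, hs]
        have hv : T.getD s m = T'.getD s m := by
          rw [PySem.Dict.getD_eq_get?_getD, PySem.Dict.getD_eq_get?_getD, h s hmem]
        simp only [rebuildStep, hg, if_neg hs, snd_F]
        by_cases hm : s ∈ validIds l <;> simp [hm, ih h', hv]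

-- how one appended element changes pass 2's output: invalid entries pass through,
-- an already-seen id changes nothing, a new id emits the table entry
theorem F_snoc_invalid (T : PySem.Dict String (List (String × String))) (l : List (List (String × String)))
    (m : List (String × String)) (hg : idOf m = none) : (F T (l ++ [m])).1 = (F T l).1 ++ [m] := by
  rw [F_append]
  rcases h : PySem.Dict.get? (⟨m⟩ : PySem.Dict String String) "id" with _ | s
  · simp [rebuildStep, h]
  · have hs : s = "" := by
      by_contra hs
      simp [idOf, h, hs] at hg
    simp [rebuildStep, h, hs]

theorem F_snoc_seen (T : PySem.Dict String (List (String × String))) (l : List (List (String × String)))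
    (m : List (String × String)) (s : String) (hg : idOf m = some s) (hm : s ∈ validIds l) :
    F T (l ++ [m]) = F T l := by
  rw [F_append]
  rcases h : PySem.Dict.get? (⟨m⟩ : PySem.Dict String String) "id" with _ | s'
  · simp [idOf, h] at hg
  · have hs : s' ≠ "" := by
      by_contra hs
      simp [idOf, h, hs] at hg
    simp only [idOf, h, if_neg hs, Option.some.injEq] at hg
    subst hg
    have hmem : s' ∈ (F T l).2 := by
      rw [snd_F]
      exact (PySem.Set.mem_ofList _ _).mpr hm
    simp [rebuildStep, h, hs, hmem]

theorem F_snoc_new (T : PySem.Dict String (List (String × String))) (l : List (List (String × String)))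
    (m : List (String × String)) (s : String) (hg : idOf m = some s) (hm : s ∉ validIds l) :
    (F T (l ++ [m])).1 = (F T l).1 ++ [T.getD s m] := by
  rw [F_append]
  rcases h : PySem.Dict.get? (⟨m⟩ : PySem.Dict String String) "id" with _ | s'
  · simp [idOf, h] at hg
  · have hs : s' ≠ "" := by
      by_contra hs
      simp [idOf, h, hs] at hg
    simp only [idOf, h, if_neg hs, Option.some.injEq] at hg
    subst hg
    have hmem : s' ∉ (F T l).2 := by
      rw [snd_F]
      simp [PySem.Set.mem_ofList, hm]
    simp [rebuildStep, h, hs, hmem]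

-- main invariant: A's accumulated output is B's pass-2 output over the prefix with B's best table
-- over the prefix, and A's index table points at each id's first-occurrence slot of the output
theorem main_inv (l : List (List (String × String))) :
    (Afold l).1 = (F (bestD l) l).1 ∧
    ∀ i, match (Afold l).2.get? i with
      | none => i ∉ validIds l
      | some j => i ∈ validIds l ∧ ∀ T : PySem.Dict String (List (String × String)),
          j < (F T l).1.length ∧
          (∀ v, (F (T.insert i v) l).1 = (F T l).1.set j v) ∧
          (∀ w, T.get? i = some w → ((F T l).1)[j]? = some w) := by
  induction l using List.reverseRecOn with
  | nil =>
    refine ⟨rfl, fun i => ?_⟩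
    simp [Afold, validIds, PySem.Dict.get?_empty]
  | append_singleton l m IH =>
    obtain ⟨ih1, ih2⟩ := IH
    rw [Afold_append, bestD_append]
    rcases hg : PySem.Dict.get? (⟨m⟩ : PySem.Dict String String) "id" with _ | s
    case none =>
      have hid : idOf m = none := by simp [idOf, hg]
      refine ⟨?_, fun i => ?_⟩
      · rw [F_snoc_invalid _ _ _ hid]
        simp [stepA, hg, bestStep, ih1]
      · have h2 := ih2 i
        simp only [stepA, hg]
        rcases hx : (Afold l).2.get? i with _ | j <;> rw [hx] at h2
        · rw [validIds_append, hid]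
          simpa using h2
        · obtain ⟨hmem, hT⟩ := h2
          refine ⟨by rw [validIds_append, hid]; simpa using hmem, fun T => ?_⟩
          obtain ⟨hlen, hset, hget⟩ := hT T
          refine ⟨?_, fun v => ?_, fun w hw => ?_⟩
          · rw [F_snoc_invalid _ _ _ hid]; simp; omega
          · rw [F_snoc_invalid _ _ _ hid, F_snoc_invalid _ _ _ hid, List.set_append, if_pos hlen, hset v]
          · rw [F_snoc_invalid _ _ _ hid, List.getElem?_append_left hlen]
            exact hget w hw
    case some =>
      by_cases hs : s = ""
      case pos =>
        have hid : idOf m = none := by simp [idOf, hg, hs]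
        refine ⟨?_, fun i => ?_⟩
        · rw [F_snoc_invalid _ _ _ hid]
          simp [stepA, hg, hs, bestStep, ih1]
        · have h2 := ih2 i
          simp only [stepA, hg, if_pos hs]
          rcases hx : (Afold l).2.get? i with _ | j <;> rw [hx] at h2
          · rw [validIds_append, hid]
            simpa using h2
          · obtain ⟨hmem, hT⟩ := h2
            refine ⟨by rw [validIds_append, hid]; simpa using hmem, fun T => ?_⟩
            obtain ⟨hlen, hset, hget⟩ := hT T
            refine ⟨?_, fun v => ?_, fun w hw => ?_⟩
            · rw [F_snoc_invalid _ _ _ hid]; simp; omega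
            · rw [F_snoc_invalid _ _ _ hid, F_snoc_invalid _ _ _ hid, List.set_append, if_pos hlen, hset v]
            · rw [F_snoc_invalid _ _ _ hid, List.getElem?_append_left hlen]
              exact hget w hw
      case neg =>
        have hid : idOf m = some s := by simp [idOf, hg, hs]
        rcases hx : (Afold l).2.get? s with _ | j
        case none =>
          -- first occurrence of id s
          have hnot : s ∉ validIds l := by
            have h2 := ih2 s; rw [hx] at h2; exact h2
          have hbest : (bestD l).get? s = none := (bestD_get?_none l s).mpr hnot
          have hsmem : s ∈ validIds (l ++ [m]) := by
            rw [validIds_append, hid]; simp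
          refine ⟨?_, fun i => ?_⟩
          · rw [F_snoc_new _ _ _ s hid hnot]
            have hc : (F ((bestD l).insert s m) l).1 = (F (bestD l) l).1 := by
              apply F_congr
              intro i hi
              exact PySem.Dict.get?_insert_of_ne _ _ (fun e => hnot (e ▸ hi))
            simp [stepA, hg, hs, hx, bestStep, hbest, hc, ih1,
              PySem.Dict.getD_insert_self]
          · simp only [stepA, hg, if_neg hs, hx]
            by_cases hi : i = s
            · subst hi
              rw [PySem.Dict.get?_insert_self]
              refine ⟨hsmem, fun T => ?_⟩
              have hlenT : (Afold l).1.length = (F T l).1.length := by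
                rw [ih1]; exact F_length _ _ _
              refine ⟨?_, fun v => ?_, fun w hw => ?_⟩
              · rw [F_snoc_new _ _ _ i hid hnot]
                simp [hlenT]
              · rw [F_snoc_new _ _ _ i hid hnot, F_snoc_new _ _ _ i hid hnot]
                have hc : (F (T.insert i v) l).1 = (F T l).1 := by
                  apply F_congr
                  intro i' hi'
                  exact PySem.Dict.get?_insert_of_ne _ _ (fun e => hnot (e ▸ hi'))
                rw [hc, PySem.Dict.getD_insert_self, List.set_append, if_neg (by omega),
                  hlenT]
                simp
              · rw [F_snoc_new _ _ _ i hid hnot, hlenT, List.getElem?_concat_length,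
                  PySem.Dict.getD_eq_get?_getD, hw]
                rfl
            · rw [PySem.Dict.get?_insert_of_ne _ _ hi]
              have h2i := ih2 i
              rcases hx2 : (Afold l).2.get? i with _ | j' <;> rw [hx2] at h2i
              · rw [validIds_append, hid]
                simp [h2i, hi]
              · obtain ⟨hm2, hT2⟩ := h2i
                refine ⟨by rw [validIds_append]; exact List.mem_append_left _ hm2, fun T => ?_⟩
                obtain ⟨ha, hb2, hc2⟩ := hT2 T
                refine ⟨?_, fun v => ?_, fun w hw => ?_⟩
                · rw [F_snoc_new _ _ _ s hid hnot]
                  simp; omega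
                · rw [F_snoc_new _ _ _ s hid hnot, F_snoc_new _ _ _ s hid hnot,
                    PySem.Dict.getD_insert_of_ne _ _ _ (fun e => hi e.symm),
                    List.set_append, if_pos ha, hb2 v]
                · rw [F_snoc_new _ _ _ s hid hnot, List.getElem?_append_left ha]
                  exact hc2 w hw
        case some =>
          -- id s already seen: A updates slot j in place, B updates the best table
          have h2 := ih2 s; rw [hx] at h2
          obtain ⟨hmem, hT⟩ := h2
          rcases hb : (bestD l).get? s with _ | cur
          · exact absurd hmem ((bestD_get?_none l s).mp hb)
          · obtain ⟨hlen0, hset0, hget0⟩ := hT (bestD l)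
            have hj : ((F (bestD l) l).1)[j]? = some cur := hget0 cur hb
            have hgetd : (Afold l).1.getD j [] = cur := by
              rw [ih1, List.getD_eq_getElem?_getD, hj]; rfl
            have hgoal2 : ∀ i, match (Afold l).2.get? i with
                | none => i ∉ validIds (l ++ [m])
                | some j' => i ∈ validIds (l ++ [m]) ∧
                    ∀ T : PySem.Dict String (List (String × String)),
                      j' < (F T (l ++ [m])).1.length ∧
                      (∀ v, (F (T.insert i v) (l ++ [m])).1 = (F T (l ++ [m])).1.set j' v) ∧
                      (∀ w, T.get? i = some w → ((F T (l ++ [m])).1)[j']? = some w) := by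
              intro i
              have h2i := ih2 i
              rcases hx2 : (Afold l).2.get? i with _ | j' <;> rw [hx2] at h2i
              · have hi : i ≠ s := by
                  intro e; rw [e, hx] at hx2; cases hx2
                rw [validIds_append, hid]
                simp [h2i, hi]
              · obtain ⟨hm2, hT2⟩ := h2i
                refine ⟨by rw [validIds_append]; exact List.mem_append_left _ hm2, fun T => ?_⟩
                obtain ⟨ha, hb2, hc2⟩ := hT2 T
                refine ⟨?_, fun v => ?_, fun w hw => ?_⟩
                · rw [F_snoc_seen T l m s hid hmem]; exact ha
                · rw [F_snoc_seen (T.insert i v) l m s hid hmem,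
                    F_snoc_seen T l m s hid hmem]
                  exact hb2 v
                · rw [F_snoc_seen T l m s hid hmem]
                  exact hc2 w hw
            by_cases c : pyStrGe (memTs m).toList (memTs cur).toList = true
            · refine ⟨?_, ?_⟩
              · simp only [stepA, hg, if_neg hs, hx, hgetd, c, if_true, bestStep, hb]
                rw [(F_snoc_seen ((bestD l).insert s m) l m s hid hmem), hset0 m, ih1]
              · simp only [stepA, hg, if_neg hs, hx, hgetd, c, if_true]
                exact hgoal2
            · rw [Bool.not_eq_true] at c
              refine ⟨?_, ?_⟩
              · simp only [stepA, hg, if_neg hs, hx, hgetd, c, Bool.false_eq_true, if_false,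
                  bestStep, hb]
                rw [(F_snoc_seen (bestD l) l m s hid hmem), ih1]
              · simp only [stepA, hg, if_neg hs, hx, hgetd, c, Bool.false_eq_true, if_false]
                exact hgoal2

-- ===== VERDICT (by name: the statement is the Claim_ definition above) =====
theorem dedupe_memories_by_id_py_spec : Claim_equal_dedupe_memories_by_id_py := by
  intro memories _
  unfold Spec_dedupe_memories_by_id_py dedupe_memories_by_id_py dedupe_memories_by_id_py_alt
  exact (main_inv memories).1
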